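-- pv_equiv track=rewrite | github.com/JungYeonHwi/Algorithm_Study | BaekJoon_python/1308.py | check
-- ===== SOURCE A (Python) =====
-- def check(s):
--     answer = 0
--
--     for year in range(s, s + 1000) :
--         if year % 400 == 0 : answer += 366
--         elif year % 100 == 0 : answer += 365
--         elif year % 4 == 0 : answer += 366
--         else : answer += 365
--
--     return answer
-- ===== SOURCE B (Python) =====
-- def check(s):
--     def f(n):
--         # number of leap years among 1..n (extended to all integers via floor division)
--         return n // 4 - n // 100 + n // 400
--     return 365 * 1000 + f(s + 999) - f(s - 1)
-- ===== Notes on version B (the rewrite author's own statement) =====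
-- stated objective: simpler
-- what changed: Replaced the thousand-iteration loop over the year window with a closed form: the base day count plus the leap-year count of the window, computed arithmetically via a helper f(n) = n//4 - n//100 + n//400 as f(s+999) - f(s-1).
import Mathlib
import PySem

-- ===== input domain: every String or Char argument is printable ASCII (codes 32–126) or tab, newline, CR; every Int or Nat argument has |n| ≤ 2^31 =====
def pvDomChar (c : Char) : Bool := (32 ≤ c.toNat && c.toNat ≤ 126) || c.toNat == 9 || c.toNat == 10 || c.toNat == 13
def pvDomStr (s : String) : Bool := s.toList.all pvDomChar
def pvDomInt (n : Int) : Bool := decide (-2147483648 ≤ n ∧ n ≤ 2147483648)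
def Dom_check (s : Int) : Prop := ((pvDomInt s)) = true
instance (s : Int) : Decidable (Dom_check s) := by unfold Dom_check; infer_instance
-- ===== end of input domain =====

-- B replaces A's 1000-iteration loop by a closed form (365000 + arithmetic leap count): no loop at all.

-- ===== PORT A =====
def check (s : Int) : Int :=
  (PySem.List.pyRange s (s + 1000) 1).foldl
    (fun answer year =>
      if PySem.Int.mod year 400 = 0 then answer + 366
      else if PySem.Int.mod year 100 = 0 then answer + 365
      else if PySem.Int.mod year 4 = 0 then answer + 366
      else answer + 365) 0

-- ===== PORT B =====
-- f(n) = n//4 - n//100 + n//400 (Python floor division)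
def check_f (n : Int) : Int :=
  PySem.Int.floordiv n 4 - PySem.Int.floordiv n 100 + PySem.Int.floordiv n 400

def check_alt (s : Int) : Int :=
  365 * 1000 + check_f (s + 999) - check_f (s - 1)

-- ===== PRECONDITION & SPEC =====
def Spec_check (s : Int) (out : Int) : Prop := out = check_alt s
instance (s : Int) (out : Int) : Decidable (Spec_check s out) := by unfold Spec_check; infer_instance

-- ===== CLAIM (what is proved, stated in full; the proofs are below) =====
def Claim_equal_check : Prop := ∀ (s : Int), Dom_check s → Spec_check s (check s)

-- ===== LEMMAS AND PROOFS =====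

-- one loop step adds 365 plus the increment of the leap-count function
theorem check_step (acc n : Int) :
    (if PySem.Int.mod n 400 = 0 then acc + 366
     else if PySem.Int.mod n 100 = 0 then acc + 365
     else if PySem.Int.mod n 4 = 0 then acc + 366
     else acc + 365) = acc + 365 + (check_f n - check_f (n - 1)) := by
  have h400 : PySem.Int.mod n 400 = n % 400 := PySem.Int.mod_eq_emod_of_pos (by norm_num)
  have h100 : PySem.Int.mod n 100 = n % 100 := PySem.Int.mod_eq_emod_of_pos (by norm_num)
  have h4 : PySem.Int.mod n 4 = n % 4 := PySem.Int.mod_eq_emod_of_pos (by norm_num)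
  have f4 : ∀ m : Int, PySem.Int.floordiv m 4 = m / 4 :=
    fun m => PySem.Int.floordiv_eq_ediv_of_pos (by norm_num)
  have f100 : ∀ m : Int, PySem.Int.floordiv m 100 = m / 100 :=
    fun m => PySem.Int.floordiv_eq_ediv_of_pos (by norm_num)
  have f400 : ∀ m : Int, PySem.Int.floordiv m 400 = m / 400 :=
    fun m => PySem.Int.floordiv_eq_ediv_of_pos (by norm_num)
  simp only [check_f, h400, h100, h4, f4, f100, f400]
  split_ifs <;> omega

-- the loop over range(s, s+k) telescopes to 365*k plus the leap count on [s, s+k-1]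
theorem check_loop (k : Nat) : ∀ (s acc : Int),
    (PySem.List.pyRange s (s + (k : Int)) 1).foldl
      (fun answer year =>
        if PySem.Int.mod year 400 = 0 then answer + 366
        else if PySem.Int.mod year 100 = 0 then answer + 365
        else if PySem.Int.mod year 4 = 0 then answer + 366
        else answer + 365) acc
    = acc + 365 * (k : Int) + (check_f (s + (k : Int) - 1) - check_f (s - 1)) := by
  induction k with
  | zero =>
    intro s acc
    simp [PySem.List.pyRange_one_eq_nil (le_refl s)]
  | succ k ih =>
    intro s acc
    have harg : s + ((k + 1 : Nat) : Int) = (s + (k : Int)) + 1 := by push_cast; ring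
    rw [harg, PySem.List.pyRange_one_succ_right (by omega), List.foldl_append, ih]
    simp only [List.foldl]
    rw [check_step]
    have h1 : s + (k : Int) + 1 - 1 = s + (k : Int) := by ring
    rw [h1]
    push_cast
    ring

-- ===== VERDICT (by name: the statement is the Claim_ definition above) =====
theorem check_spec : Claim_equal_check := by
  intro s _
  unfold Spec_check check check_alt
  have h : (1000 : Int) = ((1000 : Nat) : Int) := rfl
  rw [h, check_loop 1000 s 0]
  have h2 : s + ((1000 : Nat) : Int) - 1 = s + 999 := by push_cast; ring
  rw [h2]
  push_cast
  ring
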